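-- pv_equiv track=rewrite | github.com/rnuxoll/nand2tetris | 06 copy/hack_assembler.py | process_label_symbols
-- ===== SOURCE A (Python) =====
-- def process_label_symbols(program):
--     label_dict = {}
--
--     for n, l in enumerate(program):
--         if l[0] == "(" and l[-1] == ")":
--             symbol_name = l[1:-1]
--             label_dict[symbol_name] = n - len(label_dict)
--
--     for k in label_dict.keys():
--         program.remove("("+k+")")
--
--     return label_dict
-- ===== SOURCE B (Python) =====
-- def process_label_symbols(program):
--     # One pass: a label's address is the number of instruction lines seen so
--     # far; non-label lines are collected and written back in one scan.
--     labels = {}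
--     kept = []
--     for line in program:
--         if line[0] == "(" and line[-1] == ")":
--             labels[line[1:-1]] = len(kept)
--         else:
--             kept.append(line)
--     program[:] = kept
--     return labels
-- ===== Notes on version B (the rewrite author's own statement) =====
-- stated objective: simpler
-- what changed: A derives each label's address from the running dict length and then strips label lines with one program.remove scan per label; B makes a single pass that records each label as the count of instruction lines kept so far and writes the kept lines back in the same pass. Pre_ excludes programs containing an empty line (A raises IndexError) and programs that define the same label name twice, where A's dict-overwrite address is accidental.
-- outside the precondition, e.g. on process_label_symbols(['(L)', '(L)', '@1', '(M)']): A returns {'L': 0, 'M': 2}, B returns {'L': 0, 'M': 1}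
import Mathlib
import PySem

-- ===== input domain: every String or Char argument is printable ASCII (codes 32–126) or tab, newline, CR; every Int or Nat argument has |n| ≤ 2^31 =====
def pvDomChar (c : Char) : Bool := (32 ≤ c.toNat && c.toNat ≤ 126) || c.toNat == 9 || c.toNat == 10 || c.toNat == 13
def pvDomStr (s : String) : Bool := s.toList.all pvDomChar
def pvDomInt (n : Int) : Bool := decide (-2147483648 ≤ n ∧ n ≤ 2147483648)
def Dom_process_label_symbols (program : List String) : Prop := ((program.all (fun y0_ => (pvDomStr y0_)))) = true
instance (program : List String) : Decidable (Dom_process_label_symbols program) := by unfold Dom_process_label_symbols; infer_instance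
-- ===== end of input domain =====

-- B replaces A's running-dict-length address computation plus per-label program.remove scans by a
-- single pass that records each label as the count of kept instruction lines (objective: simpler).
-- Both Pythons mutate the argument list identically (label lines stripped); the equivalence proved
-- here is about the RETURN value (the label dict as an association list) only.

-- shared helper: the test 'l[0] == "(" and l[-1] == ")"' and the name 'l[1:-1]', identical in both Pythons
def pvIsLabel (l : String) : Bool :=
  (PySem.Str.pyGet? l 0 == some '(') && (PySem.Str.pyGet? l (-1) == some ')')
def pvName (l : String) : String := PySem.Str.slice l (some 1) (some (-1))

-- ===== PORT A =====
-- one step of A's loop: 'if …: label_dict[l[1:-1]] = n - len(label_dict)'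
def pvStepA (d : PySem.Dict String Int) (p : Int × String) : PySem.Dict String Int :=
  if pvIsLabel p.2 then d.insert (pvName p.2) (p.1 - (d.size : Int)) else d

def process_label_symbols (program : List String) : List (String × Int) :=
  let label_dict := (PySem.List.enumerate program).foldl pvStepA PySem.Dict.empty
  -- 'for k in label_dict.keys(): program.remove("("+k+")")' only mutates the argument list
  -- (not modelled: Lean values are immutable); the returned value is label_dict
  label_dict.items

-- ===== PORT B =====
-- one step of B's loop: record 'labels[line[1:-1]] = len(kept)' or 'kept.append(line)'
def pvStepB (st : PySem.Dict String Int × List String) (l : String) :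
    PySem.Dict String Int × List String :=
  if pvIsLabel l then (st.1.insert (pvName l) (st.2.length : Int), st.2) else (st.1, st.2 ++ [l])

def process_label_symbols_alt (program : List String) : List (String × Int) :=
  let st := program.foldl pvStepB (PySem.Dict.empty, [])
  -- 'program[:] = kept' only mutates the argument list (not modelled); the return value is labels
  st.1.items

-- ===== PRECONDITION & SPEC =====
-- the label names of a program, in order
def pvNames (xs : List String) : List String := (xs.filter pvIsLabel).map pvName

-- Pre_ excludes programs containing an empty line, on which A raises IndexError at l[0], and
-- programs defining the same label name twice, where A's dict-overwrite address is accidental.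
def Pre_process_label_symbols (program : List String) : Prop :=
  "" ∉ program ∧ (pvNames program).Nodup
instance (program : List String) : Decidable (Pre_process_label_symbols program) := by
  unfold Pre_process_label_symbols; infer_instance

def pvWitness_process_label_symbols : List String := ["@1", "(LOOP)", "D=M", "(END)", "0;JMP"]

def Spec_process_label_symbols (program : List String) (out : List (String × Int)) : Prop :=
  out = process_label_symbols_alt program
instance (program : List String) (out : List (String × Int)) :
    Decidable (Spec_process_label_symbols program out) := by
  unfold Spec_process_label_symbols; infer_instance

-- ===== CLAIM =====
def Claim_equal_process_label_symbols : Prop := ∀ (program : List String), Dom_process_label_symbols program → Pre_process_label_symbols program → Spec_process_label_symbols program (process_label_symbols program)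

-- ===== LEMMAS AND PROOFS =====

lemma pv_names_append (xs ys : List String) : pvNames (xs ++ ys) = pvNames xs ++ pvNames ys := by
  simp [pvNames]

-- main loop invariant: with all remaining label names fresh, the two folds build dicts with the
-- same items; the prefix p carries A's counter and B's kept-line count
lemma pv_loop (xs : List String) : ∀ (p : List String) (dA dB : PySem.Dict String Int)
    (kept : List String),
    (pvNames (p ++ xs)).Nodup →
    dA.items = dB.items →
    dA.keys = pvNames p →
    dA.size = (pvNames p).length →
    (kept.length : Int) = (p.length : Int) - ((pvNames p).length : Int) →
    ((PySem.List.enumerate xs (p.length : Int)).foldl pvStepA dA).items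
      = ((xs.foldl pvStepB (dB, kept)).1).items := by
  induction xs with
  | nil => intro p dA dB kept _ h1 _ _ _; simpa [PySem.List.enumerate] using h1
  | cons x xs ih =>
      intro p dA dB kept hnd h1 h2 h3 h4
      rw [PySem.List.enumerate_cons]
      simp only [List.foldl_cons, pvStepA, pvStepB]
      cases hx : pvIsLabel x with
      | false =>
          simp only [Bool.false_eq_true, if_false]
          have hrw : pvNames (p ++ x :: xs) = pvNames ((p ++ [x]) ++ xs) := by
            simp
          rw [hrw] at hnd
          have hnp : pvNames (p ++ [x]) = pvNames p := by
            simp [pvNames, hx]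
          have h := ih (p ++ [x]) dA dB (kept ++ [x]) hnd h1 (by rw [h2, hnp])
            (by rw [h3, hnp]) (by rw [hnp]; simp; omega)
          have hlen : ((p ++ [x]).length : Int) = (p.length : Int) + 1 := by simp
          rwa [hlen] at h
      | true =>
          simp only [if_true]
          have hrw : pvNames (p ++ x :: xs) = pvNames ((p ++ [x]) ++ xs) := by simp
          have hnp : pvNames (p ++ [x]) = pvNames p ++ [pvName x] := by
            simp [pvNames, hx]
          -- freshness of pvName x in dA (and hence dB)
          have hfresh : pvName x ∉ pvNames p := by
            have : (pvNames p ++ pvNames (x :: xs)).Nodup := by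
              rw [← pv_names_append]; exact hnd
            have hmem : pvName x ∈ pvNames (x :: xs) := by
              simp [pvNames, hx]
            intro hc
            exact (List.disjoint_of_nodup_append this) hc hmem
          have hkeysB : dB.keys = dA.keys := by
            show dB.items.map (·.1) = dA.items.map (·.1)
            rw [h1]
          have hcA : dA.contains (pvName x) = false := by
            rw [Bool.eq_false_iff]
            intro hc
            exact hfresh (h2 ▸ (PySem.Dict.contains_iff_mem_keys dA _).1 hc)
          have hcB : dB.contains (pvName x) = false := by
            rw [Bool.eq_false_iff]
            intro hc
            exact hfresh (h2 ▸ hkeysB ▸ (PySem.Dict.contains_iff_mem_keys dB _).1 hc)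
          -- the inserted values coincide: n - len(label_dict) = len(kept)
          have hval : (p.length : Int) - (dA.size : Int) = (kept.length : Int) := by
            rw [h3, h4]
          have hitems : (dA.insert (pvName x) ((p.length : Int) - (dA.size : Int))).items
              = (dB.insert (pvName x) ((kept.length : Int))).items := by
            rw [PySem.Dict.items_insert_of_not_contains dA _ hcA,
                PySem.Dict.items_insert_of_not_contains dB _ hcB, h1, hval]
          rw [hrw] at hnd
          have h := ih (p ++ [x]) (dA.insert (pvName x) ((p.length : Int) - (dA.size : Int)))
            (dB.insert (pvName x) ((kept.length : Int))) kept hnd hitems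
            (by rw [PySem.Dict.keys_insert_of_not_contains dA _ hcA, h2, hnp])
            (by rw [PySem.Dict.size_insert, if_neg (by simp [hcA]), h3, hnp]; simp)
            (by rw [hnp]; simp; omega)
          have hlen : ((p ++ [x]).length : Int) = (p.length : Int) + 1 := by simp
          rwa [hlen] at h

theorem pv_main (program : List String) (hnd : (pvNames program).Nodup) :
    process_label_symbols program = process_label_symbols_alt program := by
  unfold process_label_symbols process_label_symbols_alt
  have h := pv_loop program [] PySem.Dict.empty PySem.Dict.empty [] (by simpa using hnd)
    rfl (by simp [pvNames, PySem.Dict.keys, PySem.Dict.empty])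
    (by simp [pvNames, PySem.Dict.size, PySem.Dict.empty]) (by simp [pvNames])
  simpa using h

-- ===== VERDICT =====
theorem process_label_symbols_spec : Claim_equal_process_label_symbols := by
  intro program _ hpre
  unfold Spec_process_label_symbols
  exact pv_main program hpre.2
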